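-- pv_equiv track=rewrite | github.com/vaishnavivaishnav-squareboat/sugar_india_services | app/services/email_generation/email_gen_service.py | _parse_email_output
-- ===== SOURCE A (Python) =====
-- def _parse_email_output(raw: str) -> tuple[str, str]:
--     """
--     Split raw model output into (subject, body).
--
--     Expects the first line starting with "SUBJECT:" to carry the subject;
--     everything else is concatenated as the body.
--     """
--     subject, body_lines, past_subject = "", [], False
--     for line in raw.strip().split("\n"):
--         if line.startswith("SUBJECT:") and not past_subject:
--             subject     = line.replace("SUBJECT:", "").strip()
--             past_subject = True
--         else:
--             body_lines.append(line)
--     return subject, "\n".join(body_lines).strip()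
-- ===== SOURCE B (Python) =====
-- def _parse_email_output(raw: str) -> tuple[str, str]:
--     # String-level: never builds a line list; cuts the subject line out of the
--     # whole text with str.partition on the newline-prefixed stripped string.
--     head, mark, tail = ("\n" + raw.strip()).partition("\nSUBJECT:")
--     if not mark:
--         return "", head[1:].strip()
--     subj, nl, rest = tail.partition("\n")
--     return subj.replace("SUBJECT:", "").strip(), (head[1:] + nl + rest).strip()
-- ===== Notes on version B (the rewrite author's own statement) =====
-- stated objective: alternative
-- what changed: B never builds a line list: it works on the whole stripped string, locating the subject line with str.partition on the newline-prefixed text and cutting it out by string slicing, instead of A's split-into-lines loop with a flag and a body accumulator.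
import Mathlib
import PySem

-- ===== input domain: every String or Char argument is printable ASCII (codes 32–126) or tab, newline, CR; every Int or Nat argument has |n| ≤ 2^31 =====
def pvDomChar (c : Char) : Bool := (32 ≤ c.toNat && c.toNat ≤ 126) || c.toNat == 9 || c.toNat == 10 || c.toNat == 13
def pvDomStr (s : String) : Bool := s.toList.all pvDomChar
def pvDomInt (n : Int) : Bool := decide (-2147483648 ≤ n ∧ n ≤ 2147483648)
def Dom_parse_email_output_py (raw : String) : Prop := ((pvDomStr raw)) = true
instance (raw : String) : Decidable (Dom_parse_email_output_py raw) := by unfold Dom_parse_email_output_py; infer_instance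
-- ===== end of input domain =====

-- B replaces A's split-into-lines loop (flag + body accumulator) by whole-string surgery:
-- it locates the subject line with str.partition on the newline-prefixed stripped text and
-- cuts that line out by string slicing; no line list is ever built. Same cost, different algorithm.

-- ===== PORT A =====
def pvSubjOf (line : List Char) : List Char :=
  PySem.Chars.strip (PySem.Chars.replace line "SUBJECT:".toList [])

-- A's loop body: state = (subject, body_lines, past_subject)
def pvStepA (st : List Char × List (List Char) × Bool) (line : List Char) :
    List Char × List (List Char) × Bool :=
  if PySem.Chars.startswith line "SUBJECT:".toList && !st.2.2 then (pvSubjOf line, st.2.1, true)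
  else (st.1, st.2.1 ++ [line], st.2.2)

def parse_email_output_py (raw : String) : String × String :=
  let lines := (PySem.Chars.split? (PySem.Chars.strip raw.toList) "\n".toList).getD []
  let st := lines.foldl pvStepA ([], [], false)
  (String.ofList st.1, String.ofList (PySem.Chars.strip (PySem.Chars.join "\n".toList st.2.1)))

-- ===== PORT B =====
-- exact port of Python's str.partition(sep) for nonempty sep: first occurrence via find, then the two slices
def pvPartition (cs sep : List Char) : List Char × List Char × List Char :=
  let i := PySem.Chars.find cs sep
  if i = -1 then (cs, [], [])
  else (PySem.List.slice cs none (some i), sep, PySem.List.slice cs (some (i + (sep.length : Int))) none)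

def parse_email_output_py_alt (raw : String) : String × String :=
  let t := "\n".toList ++ PySem.Chars.strip raw.toList
  let hmt := pvPartition t "\nSUBJECT:".toList
  if hmt.2.1 = [] then
    ("", String.ofList (PySem.Chars.strip (PySem.List.slice hmt.1 (some 1) none)))
  else
    let snr := pvPartition hmt.2.2 "\n".toList
    (String.ofList (PySem.Chars.strip (PySem.Chars.replace snr.1 "SUBJECT:".toList [])),
     String.ofList (PySem.Chars.strip (PySem.List.slice hmt.1 (some 1) none ++ snr.2.1 ++ snr.2.2)))

-- ===== PRECONDITION & SPEC =====
def Spec_parse_email_output_py (raw : String) (out : String × String) : Prop := out = parse_email_output_py_alt raw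
instance (raw : String) (out : String × String) : Decidable (Spec_parse_email_output_py raw out) := by unfold Spec_parse_email_output_py; infer_instance

-- ===== CLAIM (what is proved, stated in full; the proofs are below) =====
def Claim_equal_parse_email_output_py : Prop := ∀ (raw : String), Dom_parse_email_output_py raw → Spec_parse_email_output_py raw (parse_email_output_py raw)

-- ===== LEMMAS AND PROOFS =====

-- abbreviations for the two fixed patterns
def pvP : List Char := "SUBJECT:".toList
def pvM : List Char := "\nSUBJECT:".toList

theorem pvM_eq : pvM = '\n' :: pvP := by decide

-- (first line, remaining lines) of a text, the reference shape of split("\n")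
def pvLines : List Char → List Char × List (List Char)
  | [] => ([], [])
  | c :: rest =>
      let r := pvLines rest
      if c = '\n' then ([], r.1 :: r.2) else (c :: r.1, r.2)

-- join with "\n", in (first line, rest) form
def pvJoin : List Char → List (List Char) → List Char
  | a, [] => a
  | a, b :: r => a ++ '\n' :: pvJoin b r

-- locate the first P-prefixed line: (lines before, that line, lines after)
def pvFind : List Char → List (List Char) → Option (List (List Char) × List Char × List (List Char))
  | L, Ls =>
      if pvP.isPrefixOf L then some ([], L, Ls)
      else match Ls with
        | [] => none
        | B0 :: rest =>
            match pvFind B0 rest with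
            | none => none
            | some (pre, l, post) => some (L :: pre, l, post)

def pvHead : List (List Char) → List Char
  | [] => []
  | p :: ps => '\n' :: pvJoin p ps

theorem pv_splitOn_go (l : List Char) : ∀ (fuel : Nat) (cur : List Char) (acc : List (List Char)),
    l.length < fuel →
    PySem.Chars.splitOn.go ['\n'] fuel l cur acc
      = acc.reverse ++ ((cur.reverse ++ (pvLines l).1) :: (pvLines l).2) := by
  induction l with
  | nil =>
      intro fuel cur acc h
      cases fuel with
      | zero => omega
      | succ f => simp [PySem.Chars.splitOn.go, pvLines]
  | cons c rest ih =>
      intro fuel cur acc h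
      cases fuel with
      | zero => omega
      | succ f =>
          by_cases hc : c = '\n'
          · subst hc
            have hp : (['\n'] : List Char).isPrefixOf ('\n' :: rest) = true := by
              simp [List.isPrefixOf]
            rw [PySem.Chars.splitOn.go]
            simp only [hp, if_pos]
            rw [show List.drop (['\n'] : List Char).length ('\n' :: rest) = rest from rfl,
              ih f [] (List.reverse cur :: acc) (by simpa using Nat.lt_of_succ_lt_succ h)]
            simp [pvLines]
          · have hp : (['\n'] : List Char).isPrefixOf (c :: rest) = false := by
              simp [List.isPrefixOf]
              exact fun hcc => absurd hcc.symm hc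
            rw [PySem.Chars.splitOn.go]
            simp only [hp, Bool.false_eq_true, if_false]
            rw [ih f (c :: cur) acc (by simpa using Nat.lt_of_succ_lt_succ h)]
            simp [pvLines, hc]


theorem pv_splitOn (s : List Char) :
    PySem.Chars.splitOn s ['\n'] = (pvLines s).1 :: (pvLines s).2 := by
  have h := pv_splitOn_go s (s.length + 1) [] [] (by omega)
  simpa [PySem.Chars.splitOn] using h


theorem pvJoin_cons (c : Char) (a : List Char) (r : List (List Char)) :
    pvJoin (c :: a) r = c :: pvJoin a r := by
  cases r <;> simp [pvJoin]


theorem pv_join_pvLines (s : List Char) : pvJoin (pvLines s).1 (pvLines s).2 = s := by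
  induction s with
  | nil => rfl
  | cons c rest ih =>
      by_cases hc : c = '\n'
      · subst hc; simp [pvLines, pvJoin, ih]
      · simp [pvLines, hc, pvJoin_cons, ih]


theorem pv_lines_free (s : List Char) :
    '\n' ∉ (pvLines s).1 ∧ ∀ l ∈ (pvLines s).2, '\n' ∉ l := by
  induction s with
  | nil => simp [pvLines]
  | cons c rest ih =>
      by_cases hc : c = '\n'
      · subst hc
        simp only [pvLines, if_pos]
        exact ⟨by simp, by
          intro l hl
          rcases List.mem_cons.mp hl with h | h
          · exact h ▸ ih.1
          · exact ih.2 l h⟩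
      · simp only [pvLines, if_neg hc]
        refine ⟨?_, ih.2⟩
        simp only [List.mem_cons, not_or]
        exact ⟨fun hcc => hc hcc.symm, ih.1⟩


theorem pv_join_eq (a : List Char) (r : List (List Char)) :
    PySem.Chars.join ['\n'] (a :: r) = pvJoin a r := by
  induction r generalizing a with
  | nil => simp [pvJoin, PySem.Chars.join_singleton]
  | cons b rs ih => rw [PySem.Chars.join_cons_cons, pvJoin, ih]; simp


theorem pvJoin_append (p : List Char) (ps : List (List Char)) (q : List Char) (qs : List (List Char)) :
    pvJoin p (ps ++ q :: qs) = pvJoin p ps ++ '\n' :: pvJoin q qs := by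
  induction ps generalizing p with
  | nil => simp [pvJoin]
  | cons b rs ih => simp [pvJoin, ih]


theorem pv_strip_cons_nl (u : List Char) : PySem.Chars.strip ('\n' :: u) = PySem.Chars.strip u := by
  have : PySem.Chars.lstrip ('\n' :: u) = PySem.Chars.lstrip u := by
    have hs : PySem.Chars.isspace '\n' = true := by decide
    simp [PySem.Chars.lstrip, List.dropWhile, hs]
  simp [PySem.Chars.strip, this]


-- fuel irrelevance for replace.go
theorem pv_replace_go_fuel (old new : List Char) (hold : old ≠ []) :
    ∀ (f1 : Nat) (f2 : Nat) (l : List Char) (acc : List Char), l.length ≤ f1 → l.length ≤ f2 →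
    PySem.Chars.replace.go old new f1 l acc = PySem.Chars.replace.go old new f2 l acc := by
  intro f1
  induction f1 using Nat.strong_induction_on with
  | _ f1 ih =>
      intro f2 l acc h1 h2
      cases l with
      | nil =>
          cases f1 <;> cases f2 <;> simp [PySem.Chars.replace.go]
      | cons c t =>
          cases f1 with
          | zero => simp at h1
          | succ g1 =>
              cases f2 with
              | zero => simp at h2
              | succ g2 =>
                  by_cases hp : old.isPrefixOf (c :: t) = true
                  · rw [PySem.Chars.replace.go, PySem.Chars.replace.go]
                    simp only [hp, if_pos]
                    have hlen : (List.drop old.length (c :: t)).length ≤ g1 := by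
                      have : 0 < old.length := List.length_pos_iff.mpr hold
                      simp only [List.length_drop, List.length_cons] at *
                      omega
                    have hlen2 : (List.drop old.length (c :: t)).length ≤ g2 := by
                      have : 0 < old.length := List.length_pos_iff.mpr hold
                      simp only [List.length_drop, List.length_cons] at *
                      omega
                    exact ih g1 (by omega) g2 _ _ hlen hlen2
                  · rw [PySem.Chars.replace.go, PySem.Chars.replace.go]
                    simp only [hp, Bool.false_eq_true, if_false]
                    have : t.length ≤ g1 := by simp at h1; omega
                    have h2' : t.length ≤ g2 := by simp at h2; omega
                    exact ih g1 (by omega) g2 _ _ this h2'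


theorem pv_replace_go_prefix (x : List Char) (f : Nat) (acc : List Char) :
    PySem.Chars.replace.go pvP [] (f + 1) (pvP ++ x) acc = PySem.Chars.replace.go pvP [] f x acc := by
  have hxc : pvP ++ x = 'S' :: ("UBJECT:".toList ++ x) := rfl
  have hpre : pvP.isPrefixOf ('S' :: ("UBJECT:".toList ++ x)) = true := by
    rw [← hxc]; simp [List.isPrefixOf_iff_prefix]
  rw [hxc, PySem.Chars.replace.go]
  simp only [hpre, if_pos]
  rw [← hxc, show List.drop pvP.length (pvP ++ x) = x from by simp [pvP]]
  simp

theorem pv_replace_drop (x : List Char) :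
    PySem.Chars.replace (pvP ++ x) pvP [] = PySem.Chars.replace x pvP [] := by
  have hPe : pvP.isEmpty = false := by decide
  unfold PySem.Chars.replace
  simp only [hPe, Bool.false_eq_true, if_false]
  have h8 : (pvP ++ x).length = x.length + 7 + 1 := by simp [pvP]
  rw [h8, pv_replace_go_prefix x (x.length + 7) [],
    pv_replace_go_fuel pvP [] (by decide) (x.length + 7) x.length x [] (by omega) (le_refl _)]

-- find = o from a witness occurrence and minimality
theorem pv_find_eq (t sub : List Char) (o : Nat)
    (h1 : sub <+: t.drop o) (h2 : ∀ j, j < o → ¬ sub <+: t.drop j) :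
    PySem.Chars.find t sub = o := by
  have hinf : sub <:+: t := by
    rw [← PySem.Chars.isIn_iff_infix, ← PySem.Chars.exists_prefix_drop_iff_isIn]
    exact ⟨o, h1⟩
  have hnn : 0 ≤ PySem.Chars.find t sub := (PySem.Chars.find_nonneg_iff t sub).mpr hinf
  obtain ⟨hpre, hmin⟩ := PySem.Chars.find_spec hnn
  have : (PySem.Chars.find t sub).toNat = o := by
    rcases Nat.lt_trichotomy (PySem.Chars.find t sub).toNat o with h | h | h
    · exact absurd hpre (h2 _ h)
    · exact h
    · exact absurd h1 (hmin o h)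
  omega


theorem pv_find_zero (t sub : List Char) (h : sub <+: t) : PySem.Chars.find t sub = 0 := by
  have := pv_find_eq t sub 0 (by simpa using h) (by omega)
  simpa using this


-- M starts with '\n'
theorem pv_M_head (w : List Char) (h : pvM <+: w) : ∃ v, w = '\n' :: v := by
  rw [pvM_eq] at h
  cases w with
  | nil => simp at h
  | cons b v =>
      obtain ⟨hb, -⟩ := List.cons_prefix_cons.mp h
      exact ⟨v, by rw [← hb]⟩


theorem pv_not_prefix_P (L u : List Char) (hL : ¬ pvP <+: L)
    (hu : u = [] ∨ ∃ v, u = '\n' :: v) : ¬ pvP <+: (L ++ u) := by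
  intro hpre
  have htake := List.prefix_iff_eq_take.mp hpre
  rw [List.take_append] at htake
  by_cases hlen : pvP.length ≤ L.length
  · apply hL
    have : pvP.length - L.length = 0 := by omega
    rw [this] at htake
    simp only [List.take_zero, List.append_nil] at htake
    exact htake ▸ List.take_prefix _ _
  · rcases hu with rfl | ⟨v, rfl⟩
    · apply hL
      simp only [List.take_nil, List.append_nil] at htake
      rw [List.take_of_length_le (by omega)] at htake
      exact htake ▸ List.prefix_refl _
    · have hpos : 0 < pvP.length - L.length := by omega
      have hnl : '\n' ∈ pvP := by
        rw [htake, List.take_of_length_le (le_of_lt (by omega))]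
        cases hk : pvP.length - L.length with
        | zero => omega
        | succ k => simp
      exact absurd hnl (by decide)


-- single-char find lemmas for the second partition
theorem pv_find_nl_none (x : List Char) (hx : '\n' ∉ x) : PySem.Chars.find x ['\n'] = -1 := by
  rw [PySem.Chars.find_eq_neg_one_iff]
  intro hinf
  exact hx (List.singleton_sublist.mp hinf.sublist)


theorem pv_find_nl (x u : List Char) (hx : '\n' ∉ x) :
    PySem.Chars.find (x ++ '\n' :: u) ['\n'] = x.length := by
  apply pv_find_eq
  · rw [List.drop_append_of_le_length (le_refl _)]
    simp
  · intro j hj hpre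
    rw [List.drop_append_of_le_length (by omega)] at hpre
    cases hd : x.drop j with
    | nil => rw [hd] at hpre; simp at hd; omega
    | cons a as =>
        rw [hd] at hpre
        simp only [List.cons_append] at hpre
        obtain ⟨ha, -⟩ := List.cons_prefix_cons.mp hpre
        apply hx
        rw [ha]
        exact List.mem_of_mem_drop (by rw [hd]; simp : a ∈ x.drop j)


-- the shift step for find of pvM
theorem pv_drop_mid (L u : List Char) (j : Nat) (h1 : 1 ≤ j) (h2 : j ≤ L.length + 1) :
    ('\n' :: (L ++ u)).drop j = L.drop (j - 1) ++ u := by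
  cases j with
  | zero => omega
  | succ i =>
      simp only [List.drop_succ_cons, Nat.add_sub_cancel]
      exact List.drop_append_of_le_length (by omega : i ≤ L.length)

theorem pv_drop_big (L u : List Char) (j : Nat) (hj : L.length + 1 ≤ j) :
    ('\n' :: (L ++ u)).drop j = u.drop (j - (L.length + 1)) := by
  cases j with
  | zero => omega
  | succ i =>
      simp only [List.drop_succ_cons, Nat.succ_sub_succ]
      have hi : i = L.length + (i - L.length) := by omega
      conv_lhs => rw [hi]
      rw [List.drop_append]
      simp

-- no occurrence of pvM can start inside '\n' :: L for a clean line L that does not start with pvP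
theorem pv_no_occ (L u : List Char) (hL : '\n' ∉ L) (hP : ¬ pvP <+: L)
    (hu : u = [] ∨ ∃ v, u = '\n' :: v) (j : Nat) (hj : j < L.length + 1) :
    ¬ pvM <+: ('\n' :: (L ++ u)).drop j := by
  intro hpre
  rcases Nat.lt_or_ge j 1 with hj1 | hj1
  · interval_cases j
    simp only [List.drop_zero] at hpre
    rw [pvM_eq] at hpre
    obtain ⟨-, hpre⟩ := List.cons_prefix_cons.mp hpre
    exact pv_not_prefix_P L u hP hu hpre
  · rw [pv_drop_mid L u j hj1 (by omega)] at hpre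
    obtain ⟨v, hv⟩ := pv_M_head _ hpre
    cases hd : L.drop (j - 1) with
    | nil =>
        have := congrArg List.length hd
        simp at this
        omega
    | cons a as =>
        rw [hd] at hv
        simp only [List.cons_append] at hv
        have ha : a = '\n' := by injection hv
        apply hL
        rw [← ha]
        exact List.mem_of_mem_drop (by rw [hd]; simp : a ∈ L.drop (j - 1))

theorem pv_find_shift (L u : List Char) (hL : '\n' ∉ L) (hP : ¬ pvP.isPrefixOf L)
    (hu : u = [] ∨ ∃ v, u = '\n' :: v) :
    PySem.Chars.find ('\n' :: (L ++ u)) pvM =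
      if PySem.Chars.find u pvM = -1 then -1 else (L.length + 1) + PySem.Chars.find u pvM := by
  have hP' : ¬ pvP <+: L := fun h => hP (List.isPrefixOf_iff_prefix.mpr h)
  by_cases hr : PySem.Chars.find u pvM = -1
  · rw [if_pos hr, PySem.Chars.find_eq_neg_one_iff]
    intro hinf
    obtain ⟨j, hpre⟩ := (PySem.Chars.exists_prefix_drop_iff_isIn pvM _).mpr
      ((PySem.Chars.isIn_iff_infix pvM _).mpr hinf)
    rcases Nat.lt_or_ge j (L.length + 1) with hj | hj
    · exact pv_no_occ L u hL hP' hu j hj hpre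
    · rw [pv_drop_big L u j hj] at hpre
      rw [PySem.Chars.find_eq_neg_one_iff] at hr
      exact hr ((PySem.Chars.isIn_iff_infix pvM u).mp
        ((PySem.Chars.exists_prefix_drop_iff_isIn pvM u).mp ⟨_, hpre⟩))
  · rw [if_neg hr]
    have hnn : 0 ≤ PySem.Chars.find u pvM := by
      have := PySem.Chars.neg_one_le_find u pvM
      omega
    obtain ⟨hpre, hmin⟩ := PySem.Chars.find_spec hnn
    have heq : PySem.Chars.find ('\n' :: (L ++ u)) pvM
        = ((L.length + 1 + (PySem.Chars.find u pvM).toNat : Nat) : Int) := by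
      apply pv_find_eq
      · rw [pv_drop_big L u _ (by omega), show L.length + 1 + (PySem.Chars.find u pvM).toNat - (L.length + 1)
            = (PySem.Chars.find u pvM).toNat from by omega]
        exact hpre
      · intro j hj hpre2
        rcases Nat.lt_or_ge j (L.length + 1) with hj2 | hj2
        · exact pv_no_occ L u hL hP' hu j hj2 hpre2
        · rw [pv_drop_big L u j hj2] at hpre2
          exact hmin _ (by omega) hpre2
    rw [heq]
    push_cast
    omega

-- the A-side loop, characterised by pvFind
theorem pv_foldA_true (ls : List (List Char)) (s : List Char) (acc : List (List Char)) :
    ls.foldl pvStepA (s, acc, true) = (s, acc ++ ls, true) := by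
  induction ls generalizing acc with
  | nil => simp
  | cons a t ih =>
      simp only [List.foldl_cons, pvStepA, Bool.and_false, Bool.not_true]
      simpa using ih (acc ++ [a])


theorem pv_foldA_shift (ls : List (List Char)) (acc : List (List Char)) :
    ls.foldl pvStepA ([], acc, false) =
      ((ls.foldl pvStepA ([], [], false)).1,
       acc ++ (ls.foldl pvStepA ([], [], false)).2.1,
       (ls.foldl pvStepA ([], [], false)).2.2) := by
  induction ls generalizing acc with
  | nil => simp
  | cons a t ih =>
      by_cases h : PySem.Chars.startswith a "SUBJECT:".toList = true
      · simp only [List.foldl_cons, pvStepA, h, Bool.not_false, Bool.and_self, if_pos]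
        rw [pv_foldA_true, pv_foldA_true]
        simp
      · simp only [Bool.not_eq_true] at h
        simp only [List.foldl_cons, pvStepA, h, Bool.false_and,
          Bool.false_eq_true, if_false, List.nil_append]
        rw [ih (acc ++ [a]), ih [a]]
        simp


theorem pv_stepA_pos (st : List Char × List (List Char) × Bool) (L : List Char)
    (hb : pvP.isPrefixOf L = true) (hf : st.2.2 = false) :
    pvStepA st L = (pvSubjOf L, st.2.1, true) := by
  simp [pvStepA, PySem.Chars.startswith, show "SUBJECT:".toList = pvP from rfl, hb, hf]

theorem pv_stepA_neg (st : List Char × List (List Char) × Bool) (L : List Char)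
    (hb : pvP.isPrefixOf L = false) :
    pvStepA st L = (st.1, st.2.1 ++ [L], st.2.2) := by
  simp [pvStepA, PySem.Chars.startswith, show "SUBJECT:".toList = pvP from rfl, hb]

theorem pv_foldA (Ls : List (List Char)) : ∀ (L : List Char),
    (L :: Ls).foldl pvStepA ([], [], false) =
      match pvFind L Ls with
      | none => ([], L :: Ls, false)
      | some (pre, l, post) => (pvSubjOf l, pre ++ post, true) := by
  induction Ls with
  | nil =>
      intro L
      by_cases h : pvP <+: L
      · have hb : pvP.isPrefixOf L = true := List.isPrefixOf_iff_prefix.mpr h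
        rw [List.foldl_cons, pv_stepA_pos _ _ hb rfl]
        simp [pvFind, h]
      · have hb : pvP.isPrefixOf L = false := by
          rw [Bool.eq_false_iff]
          exact fun hc => h (List.isPrefixOf_iff_prefix.mp hc)
        rw [List.foldl_cons, pv_stepA_neg _ _ hb]
        simp [pvFind, h]
  | cons B0 rest ih =>
      intro L
      by_cases h : pvP <+: L
      · have hb : pvP.isPrefixOf L = true := List.isPrefixOf_iff_prefix.mpr h
        rw [List.foldl_cons, pv_stepA_pos _ _ hb rfl, pv_foldA_true]
        simp [pvFind, h]
      · have hb : pvP.isPrefixOf L = false := by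
          rw [Bool.eq_false_iff]
          exact fun hc => h (List.isPrefixOf_iff_prefix.mp hc)
        rw [List.foldl_cons, pv_stepA_neg _ _ hb]
        rw [show (([], [], false) : List Char × List (List Char) × Bool).1 = [] from rfl,
          show (([], [], false) : List Char × List (List Char) × Bool).2.1 ++ [L] = [L] from rfl,
          show (([], [], false) : List Char × List (List Char) × Bool).2.2 = false from rfl]
        rw [pv_foldA_shift (B0 :: rest) [L], ih B0]
        cases hf : pvFind B0 rest with
        | none => simp [pvFind, h, hf]
        | some res =>
            obtain ⟨pre, l, post⟩ := res
            simp [pvFind, h, hf]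

-- the find of pvM in the whole text, characterised by pvFind
theorem pvJoin_eq_append (L : List Char) (Ls : List (List Char)) :
    pvJoin L Ls = L ++ pvHead Ls := by
  cases Ls <;> simp [pvJoin, pvHead]

theorem pvFind_step (L B0 : List Char) (rest : List (List Char)) (h : ¬ pvP <+: L) :
    pvFind L (B0 :: rest) =
      match pvFind B0 rest with
      | none => none
      | some (pre, l, post) => some (L :: pre, l, post) := by
  conv_lhs => rw [pvFind.eq_def]
  simp [h]

theorem pvFind_none_step (L : List Char) (h : ¬ pvP <+: L) : pvFind L [] = none := by
  rw [pvFind.eq_def]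
  simp [h]

theorem pvFind_pos (L : List Char) (Ls : List (List Char)) (h : pvP <+: L) :
    pvFind L Ls = some ([], L, Ls) := by
  rw [pvFind.eq_def]
  simp [h]

theorem pv_findM (Ls : List (List Char)) : ∀ (L : List Char), '\n' ∉ L → (∀ l ∈ Ls, '\n' ∉ l) →
    PySem.Chars.find ('\n' :: pvJoin L Ls) pvM =
      match pvFind L Ls with
      | none => -1
      | some (pre, _, _) => ((pvHead pre).length : Int) := by
  induction Ls with
  | nil =>
      intro L hL _
      by_cases h : pvP <+: L
      · rw [pvFind_pos L [] h]
        simp only [pvHead, List.length_nil, Nat.cast_zero]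
        apply pv_find_zero
        rw [pvM_eq, show pvJoin L [] = L from rfl]
        exact List.cons_prefix_cons.mpr ⟨rfl, h⟩
      · rw [pvFind_none_step L h]
        have h0 : PySem.Chars.find [] pvM = -1 := by decide
        have hs := pv_find_shift L [] hL
          (fun hc => h (List.isPrefixOf_iff_prefix.mp hc)) (Or.inl rfl)
        rw [h0, if_pos rfl] at hs
        simpa [pvJoin] using hs
  | cons B0 rest ih =>
      intro L hL hfree
      by_cases h : pvP <+: L
      · rw [pvFind_pos L (B0 :: rest) h]
        simp only [pvHead, List.length_nil, Nat.cast_zero]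
        apply pv_find_zero
        rw [pvM_eq, show pvJoin L (B0 :: rest) = L ++ '\n' :: pvJoin B0 rest from rfl]
        exact List.cons_prefix_cons.mpr ⟨rfl, h.trans (L.prefix_append _)⟩
      · have hB0 : '\n' ∉ B0 := hfree B0 (by simp)
        have hrest : ∀ l ∈ rest, '\n' ∉ l := fun l hl => hfree l (by simp [hl])
        have hshift := pv_find_shift L ('\n' :: pvJoin B0 rest) hL
          (fun hc => h (List.isPrefixOf_iff_prefix.mp hc)) (Or.inr ⟨_, rfl⟩)
        rw [show pvJoin L (B0 :: rest) = L ++ '\n' :: pvJoin B0 rest from rfl, hshift,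
          ih B0 hB0 hrest, pvFind_step L B0 rest h]
        cases hf : pvFind B0 rest with
        | none => simp
        | some res =>
            obtain ⟨pre, l, post⟩ := res
            have hnn : ¬ (((pvHead pre).length : Int) = -1) := by omega
            have hlen : (pvHead (L :: pre)).length = L.length + 1 + (pvHead pre).length := by
              show ('\n' :: pvJoin L pre).length = _
              rw [pvJoin_eq_append]
              simp
              omega
            simp only [hnn, if_false]
            rw [hlen]
            push_cast
            ring

-- text decomposition at the located line
theorem pv_decomp (Ls : List (List Char)) : ∀ (L : List Char) (pre : List (List Char))
    (l : List Char) (post : List (List Char)), pvFind L Ls = some (pre, l, post) →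
    pvP <+: l ∧ (l = L ∨ l ∈ Ls) ∧
    '\n' :: pvJoin L Ls = pvHead pre ++ '\n' :: (l ++ pvHead post) := by
  induction Ls with
  | nil =>
      intro L pre l post h
      by_cases hp : pvP <+: L
      · rw [pvFind_pos L [] hp] at h
        simp only [Option.some.injEq, Prod.mk.injEq] at h
        obtain ⟨h1, h2, h3⟩ := h
        subst h1; subst h2; subst h3
        exact ⟨hp, Or.inl rfl, by simp [pvHead, pvJoin]⟩
      · rw [pvFind_none_step L hp] at h
        exact absurd h (by simp)
  | cons B0 rest ih =>
      intro L pre l post h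
      by_cases hp : pvP <+: L
      · rw [pvFind_pos L (B0 :: rest) hp] at h
        simp only [Option.some.injEq, Prod.mk.injEq] at h
        obtain ⟨h1, h2, h3⟩ := h
        subst h1; subst h2; subst h3
        refine ⟨hp, Or.inl rfl, ?_⟩
        rw [show pvJoin L (B0 :: rest) = L ++ '\n' :: pvJoin B0 rest from rfl]
        simp [pvHead]
      · rw [pvFind_step L B0 rest hp] at h
        cases hf : pvFind B0 rest with
        | none => rw [hf] at h; simp at h
        | some res =>
            obtain ⟨pre', l', post'⟩ := res
            rw [hf] at h
            simp only [Option.some.injEq, Prod.mk.injEq] at h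
            obtain ⟨h1, h2, h3⟩ := h
            subst h1; subst h2; subst h3
            obtain ⟨hPl, hmem, hdec⟩ := ih B0 pre' l' post' hf
            refine ⟨hPl, Or.inr (by rcases hmem with h | h <;> simp [h]), ?_⟩
            rw [show pvJoin L (B0 :: rest) = L ++ '\n' :: pvJoin B0 rest from rfl, hdec,
              show pvHead (L :: pre') = '\n' :: (L ++ pvHead pre') from by
                show '\n' :: pvJoin L pre' = _
                rw [pvJoin_eq_append]]
            simp

-- ===== VERDICT (by name: the statement is the Claim_ definition above) =====
theorem parse_email_output_py_spec : Claim_equal_parse_email_output_py := by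
  intro raw _
  unfold Spec_parse_email_output_py parse_email_output_py parse_email_output_py_alt
  simp only []
  set s := PySem.Chars.strip raw.toList with hs
  have hsplit : (PySem.Chars.split? s "\n".toList).getD [] = (pvLines s).1 :: (pvLines s).2 := by
    rw [show "\n".toList = ['\n'] from rfl]
    simp [PySem.Chars.split?, pv_splitOn]
  have hfree := pv_lines_free s
  have hjoin : pvJoin (pvLines s).1 (pvLines s).2 = s := pv_join_pvLines s
  set L := (pvLines s).1
  set Ls := (pvLines s).2
  have ht : "\n".toList ++ s = '\n' :: pvJoin L Ls := by rw [hjoin]; rfl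
  rw [hsplit, pv_foldA Ls L, ht]
  have hfind := pv_findM Ls L hfree.1 hfree.2
  cases hf : pvFind L Ls with
  | none =>
      have hfind2 : PySem.Chars.find ('\n' :: pvJoin L Ls) pvM = -1 := by
        rw [hf] at hfind; exact hfind
      simp only [hf]
      rw [show pvPartition ('\n' :: pvJoin L Ls) "\nSUBJECT:".toList
            = ('\n' :: pvJoin L Ls, [], []) from by
          rw [show "\nSUBJECT:".toList = pvM from rfl]
          simp [pvPartition, hfind2]]
      simp only [if_pos rfl]
      rw [PySem.List.slice_from_one, show ('\n' :: pvJoin L Ls).tail = pvJoin L Ls from rfl,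
        show "\n".toList = ['\n'] from rfl, pv_join_eq]
      simp
  | some res =>
      obtain ⟨pre, l, post⟩ := res
      have hfind2 : PySem.Chars.find ('\n' :: pvJoin L Ls) pvM = ((pvHead pre).length : Int) := by
        rw [hf] at hfind; exact hfind
      simp only [hf]
      obtain ⟨hPl, hmem, hdec⟩ := pv_decomp Ls L pre l post hf
      have hlfree : '\n' ∉ l := by
        rcases hmem with h | h
        · exact h ▸ hfree.1
        · exact hfree.2 l h
      have hxfree : '\n' ∉ l.drop 8 := fun hc => hlfree (List.mem_of_mem_drop hc)
      have hlP : l = pvP ++ l.drop 8 := by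
        have h0 := List.prefix_iff_eq_take.mp hPl
        rw [show pvP.length = 8 from by decide] at h0
        conv_lhs => rw [← List.take_append_drop 8 l]
        rw [← h0]
      have hto : ((pvHead pre).length : Int).toNat = (pvHead pre).length := by omega
      have hdec9 : '\n' :: pvJoin L Ls = (pvHead pre ++ '\n' :: pvP) ++ (l.drop 8 ++ pvHead post) := by
        rw [hdec]
        conv_lhs => rw [hlP]
        simp
      have hlen9 : (pvHead pre ++ '\n' :: pvP).length = (pvHead pre).length + 9 := by
        simp [pvP]
      have hpart : pvPartition ('\n' :: pvJoin L Ls) "\nSUBJECT:".toList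
          = (pvHead pre, pvM, l.drop 8 ++ pvHead post) := by
        rw [show "\nSUBJECT:".toList = pvM from rfl]
        unfold pvPartition
        rw [hfind2]
        rw [if_neg (by omega)]
        refine Prod.ext ?_ (Prod.ext rfl ?_)
        · show PySem.List.slice _ none (some _) = _
          rw [PySem.List.slice_to _ (by omega), hto]
          conv_lhs => rw [hdec]
          exact List.take_left
        · show PySem.List.slice _ (some _) none = _
          rw [PySem.List.slice_from _ (by omega)]
          rw [show (((pvHead pre).length : Int) + ((pvM.length : Nat) : Int)).toNat
                = (pvHead pre ++ '\n' :: pvP).length from by rw [hlen9]; simp [pvM]; omega]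
          conv_lhs => rw [hdec9]
          exact List.drop_left
      rw [hpart]
      rw [if_neg (by simp only []; decide)]
      have hsubj : PySem.Chars.strip (PySem.Chars.replace l "SUBJECT:".toList [])
          = PySem.Chars.strip (PySem.Chars.replace (l.drop 8) "SUBJECT:".toList []) := by
        rw [show "SUBJECT:".toList = pvP from rfl]
        conv_lhs => rw [hlP, pv_replace_drop]
      cases post with
      | nil =>
          have hsnr : pvPartition (l.drop 8 ++ pvHead []) "\n".toList = (l.drop 8, [], []) := by
            rw [show "\n".toList = ['\n'] from rfl]
            simp [pvPartition, pvHead, pv_find_nl_none _ hxfree]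
          rw [hsnr]
          simp only []
          refine Prod.ext ?_ ?_
          · show String.ofList (pvSubjOf l) = _
            unfold pvSubjOf
            rw [hsubj]
          · show String.ofList (PySem.Chars.strip (PySem.Chars.join "\n".toList (pre ++ []))) = _
            rw [PySem.List.slice_from_one, List.append_nil, List.append_nil,
              show "\n".toList = ['\n'] from rfl]
            cases pre with
            | nil => rfl
            | cons p ps =>
                rw [pv_join_eq, show pvHead (p :: ps) = '\n' :: pvJoin p ps from rfl]
                simp
      | cons q qs =>
          have hq : pvHead (q :: qs) = '\n' :: pvJoin q qs := rfl
          have hfq : PySem.Chars.find (l.drop 8 ++ pvHead (q :: qs)) ['\n']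
              = ((l.drop 8).length : Int) := by
            rw [hq]
            exact pv_find_nl _ _ hxfree
          have hsnr : pvPartition (l.drop 8 ++ pvHead (q :: qs)) "\n".toList
              = (l.drop 8, ['\n'], pvJoin q qs) := by
            rw [show "\n".toList = ['\n'] from rfl]
            unfold pvPartition
            rw [hfq, if_neg (by omega)]
            refine Prod.ext ?_ (Prod.ext rfl ?_)
            · show PySem.List.slice _ none (some _) = _
              rw [PySem.List.slice_to _ (by omega), show (((l.drop 8).length : Int)).toNat
                  = (l.drop 8).length from by omega, hq]
              exact List.take_left
            · show PySem.List.slice _ (some _) none = _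
              rw [PySem.List.slice_from _ (by omega)]
              rw [show ((((l.drop 8).length : Int)) + (((['\n'] : List Char).length : Nat) : Int)).toNat
                    = (l.drop 8 ++ ['\n']).length from by simp]
              rw [hq, show l.drop 8 ++ '\n' :: pvJoin q qs = (l.drop 8 ++ ['\n']) ++ pvJoin q qs from by simp]
              exact List.drop_left
          rw [hsnr]
          simp only []
          refine Prod.ext ?_ ?_
          · show String.ofList (pvSubjOf l) = _
            unfold pvSubjOf
            rw [hsubj]
          · show String.ofList (PySem.Chars.strip (PySem.Chars.join "\n".toList (pre ++ q :: qs))) = _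
            rw [PySem.List.slice_from_one, show "\n".toList = ['\n'] from rfl]
            cases pre with
            | nil =>
                rw [show pvHead ([] : List (List Char)) = [] from rfl,
                  List.nil_append, pv_join_eq]
                simp only [List.tail_nil, List.nil_append, List.singleton_append]
                rw [pv_strip_cons_nl]
            | cons p ps =>
                rw [show pvHead (p :: ps) = '\n' :: pvJoin p ps from rfl,
                  List.cons_append, pv_join_eq, pvJoin_append]
                simp
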